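-- pv_equiv track=rewrite | github.com/youngstunners88/health | legacy/healthcare/utils/phi_encryption.py | redact_phi
-- ===== SOURCE A (Python) =====
-- def redact_phi(data: dict, fields: list[str] | None = None) -> dict:
--     """Redact PHI fields from a dict for logging or non-secure storage."""
--     if fields is None:
--         fields = ["name", "ssn", "date_of_birth", "address", "phone", "email", "mrn"]
--     redacted = data.copy()
--     for field in fields:
--         if field in redacted:
--             redacted[field] = "[REDACTED]"
--     return redacted
-- ===== SOURCE B (Python) =====
-- def redact_phi(data: dict, fields: list[str] | None = None) -> dict:
--     """Redact PHI fields from a dict for logging or non-secure storage."""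
--     if fields is None:
--         fields = ["name", "ssn", "date_of_birth", "address", "phone", "email", "mrn"]
--     field_set = set(fields)
--     return {k: "[REDACTED]" if k in field_set else v for k, v in data.items()}
-- ===== Notes on version B (the rewrite author's own statement) =====
-- stated objective: idiomatic
-- what changed: Instead of scanning the fields list and probing/mutating a dict copy, B builds a set of field names once and produces the result in a single dict comprehension over data.items().
import Mathlib
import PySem

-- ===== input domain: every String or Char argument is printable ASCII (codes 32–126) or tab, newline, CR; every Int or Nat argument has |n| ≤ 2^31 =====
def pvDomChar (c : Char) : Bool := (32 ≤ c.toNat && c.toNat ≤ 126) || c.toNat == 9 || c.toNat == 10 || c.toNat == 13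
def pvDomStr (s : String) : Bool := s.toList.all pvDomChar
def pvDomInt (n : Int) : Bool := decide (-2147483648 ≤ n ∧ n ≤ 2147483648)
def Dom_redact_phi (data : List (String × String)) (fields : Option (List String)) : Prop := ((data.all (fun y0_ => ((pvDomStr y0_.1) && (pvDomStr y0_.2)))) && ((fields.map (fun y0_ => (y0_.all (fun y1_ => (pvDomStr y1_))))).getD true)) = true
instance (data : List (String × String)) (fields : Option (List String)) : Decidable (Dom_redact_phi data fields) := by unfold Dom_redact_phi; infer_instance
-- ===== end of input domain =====

-- B builds the result in one dict comprehension over data.items() with a precomputed field set,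
-- instead of A's scan of the fields list that probes and mutates a dict copy (idiomatic rewrite).


-- ===== PORT A =====
-- 'redacted[field] = "[REDACTED]"' on the dict: overwrite the (unique) matching key in place.
def redactSetA : List (String × String) → String → List (String × String)
  | [], _ => []
  | (k, v) :: rest, f =>
      if k == f then (k, "[REDACTED]") :: rest else (k, v) :: redactSetA rest f

def redact_phi (data : List (String × String)) (fields : Option (List String)) : List (String × String) :=
  let fs := fields.getD ["name", "ssn", "date_of_birth", "address", "phone", "email", "mrn"]
  fs.foldl (fun red f => if red.any (fun kv => kv.1 == f) then redactSetA red f else red) data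

-- ===== PORT B =====
def redact_phi_alt (data : List (String × String)) (fields : Option (List String)) : List (String × String) :=
  let fs := fields.getD ["name", "ssn", "date_of_birth", "address", "phone", "email", "mrn"]
  let fieldSet : PySem.Set String := PySem.Set.ofList fs
  data.map (fun kv => (kv.1, if PySem.Set.contains fieldSet kv.1 then "[REDACTED]" else kv.2))

-- ===== PRECONDITION & SPEC =====
-- Pre_ states the Python dict invariant: data's keys are distinct. A duplicate-key association
-- list does not correspond to any Python dict argument, so no input A returns on is excluded.
def Pre_redact_phi (data : List (String × String)) (fields : Option (List String)) : Prop :=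
  (data.map Prod.fst).Nodup

instance (data : List (String × String)) (fields : Option (List String)) : Decidable (Pre_redact_phi data fields) := by unfold Pre_redact_phi; infer_instance

def pvWitness_redact_phi : (List (String × String)) × Option (List String) :=
  ([("name", "Ann"), ("ward", "3")], some ["name", "ssn"])

def Spec_redact_phi (data : List (String × String)) (fields : Option (List String)) (out : List (String × String)) : Prop := out = redact_phi_alt data fields
instance (data : List (String × String)) (fields : Option (List String)) (out : List (String × String)) : Decidable (Spec_redact_phi data fields out) := by unfold Spec_redact_phi; infer_instance

-- ===== CLAIM (what is proved, stated in full; the proofs are below) =====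
def Claim_equal_redact_phi : Prop := ∀ (data : List (String × String)) (fields : Option (List String)), Dom_redact_phi data fields → Pre_redact_phi data fields → Spec_redact_phi data fields (redact_phi data fields)

-- ===== LEMMAS AND PROOFS =====

-- one pass of A's loop body as a map (valid because data's keys are distinct)
theorem redactSetA_eq_map (f : String) :
    ∀ (data : List (String × String)), (data.map Prod.fst).Nodup →
      redactSetA data f
        = data.map (fun kv => if kv.1 = f then (kv.1, "[REDACTED]") else kv) := by
  intro data
  induction data with
  | nil => intro _; rfl
  | cons hd tl ih =>
      intro hnd
      rw [List.map_cons, List.nodup_cons] at hnd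
      obtain ⟨hnm, hnd'⟩ := hnd
      obtain ⟨k, v⟩ := hd
      by_cases hk : k = f
      · subst hk
        simp only [redactSetA, beq_self_eq_true, if_pos, List.map_cons]
        have htl : tl.map (fun kv => if kv.1 = k then (kv.1, "[REDACTED]") else kv) = tl := by
          rw [show tl = tl.map id from (List.map_id tl).symm]
          rw [List.map_map]
          apply List.map_congr_left
          intro x hx
          have : x.1 ≠ k := fun h => hnm (List.mem_map.mpr ⟨x, hx, h⟩)
          simp [this]
        rw [htl]
      · simp only [redactSetA, List.map_cons]
        rw [if_neg (by simpa using hk), if_neg (by simpa using hk), ih hnd']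

-- A's membership guard: if f is absent, the map pass is the identity anyway
theorem map_pass_id (f : String) (data : List (String × String))
    (h : data.any (fun kv => kv.1 == f) = false) :
    data.map (fun kv => if kv.1 = f then (kv.1, "[REDACTED]") else kv) = data := by
  rw [show data = data.map id from (List.map_id data).symm, List.map_map]
  apply List.map_congr_left
  intro x hx
  by_cases hxf : x.1 = f
  · exfalso
    have : data.any (fun kv => kv.1 == f) = true :=
      List.any_eq_true.mpr ⟨x, hx, by simp [hxf]⟩
    simp [this] at h
  · simp [hxf]

theorem keys_map_pass (f : String) (data : List (String × String)) :
    (data.map (fun kv => if kv.1 = f then (kv.1, "[REDACTED]") else kv)).map Prod.fst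
      = data.map Prod.fst := by
  rw [List.map_map]
  apply List.map_congr_left
  intro x _
  by_cases h : x.1 = f <;> simp [h]

theorem foldl_redact_eq_map (fs : List String) :
    ∀ (data : List (String × String)), (data.map Prod.fst).Nodup →
      fs.foldl (fun red f => if red.any (fun kv => kv.1 == f) then redactSetA red f else red) data
        = data.map (fun kv => (kv.1, if kv.1 ∈ fs then "[REDACTED]" else kv.2)) := by
  induction fs with
  | nil => intro data _; simp
  | cons f rest ih =>
      intro data hnd
      have hstep :
          (if data.any (fun kv => kv.1 == f) then redactSetA data f else data)
            = data.map (fun kv => if kv.1 = f then (kv.1, "[REDACTED]") else kv) := by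
        by_cases h : data.any (fun kv => kv.1 == f) = true
        · rw [if_pos h, redactSetA_eq_map f data hnd]
        · rw [if_neg h, map_pass_id f data (Bool.eq_false_iff.mpr h)]
      rw [List.foldl_cons, hstep,
          ih _ (by rw [keys_map_pass]; exact hnd), List.map_map]
      apply List.map_congr_left
      intro kv _
      by_cases h : kv.1 = f
      · simp [h, List.mem_cons]
      · simp [h, List.mem_cons]

theorem contains_ofList_field (l : List String) (x : String) :
    PySem.Set.contains (PySem.Set.ofList l) x = l.contains x := by
  rw [Bool.eq_iff_iff]
  constructor
  · intro h
    have := (PySem.Set.contains_iff _ _).mp h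
    exact List.elem_iff.mpr ((PySem.Set.mem_ofList _ _).mp this)
  · intro h
    exact (PySem.Set.contains_iff _ _).mpr ((PySem.Set.mem_ofList _ _).mpr (List.elem_iff.mp h))

-- ===== VERDICT (by name: the statement is the Claim_ definition above) =====
theorem redact_phi_spec : Claim_equal_redact_phi := by
  intro data fields _ hpre
  unfold Spec_redact_phi redact_phi redact_phi_alt
  rw [foldl_redact_eq_map _ data hpre]
  apply List.map_congr_left
  intro kv _
  rw [contains_ofList_field]
  by_cases h : kv.1 ∈ (fields.getD ["name", "ssn", "date_of_birth", "address", "phone", "email", "mrn"]) <;>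
    simp [h]
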